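-- pv_equiv track=rewrite | github.com/iacopy/RCSB-Sync | src/pdbparser.py | parse_title
-- ===== SOURCE A (Python) =====
-- def parse_title(pdb_lines_iterable):
--     """
--     Read the title from a PDB iterator content.
--
--     >>> parse_title(TESTDATA.splitlines())
--     'STRUCTURE OF PNMT COMPLEXED WITH S-ADENOSYL-L-HOMOCYSTEINE AND THE ACCEPTOR SUBSTRATE OCTOPAMINE'
--     >>> parse_title([])
--     ''
--     """
--     title = []
--     for line in pdb_lines_iterable:
--         if line.startswith("TITLE"):
--             title.append(line[10:].rstrip())
--         elif title:
--             break
--     return "".join(title)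
-- ===== SOURCE B (Python) =====
-- def parse_title(pdb_lines_iterable):
--     lines = list(pdb_lines_iterable)
--     flags = [line.startswith("TITLE") for line in lines]
--     if True not in flags:
--         return ""
--     start = flags.index(True)
--     tail = flags[start:]
--     length = tail.index(False) if False in tail else len(tail)
--     return "".join(line[10:].rstrip() for line in lines[start:start + length])
-- ===== Notes on version B (the rewrite author's own statement) =====
-- stated objective: alternative
-- what changed: Instead of a flag-driven loop with an early break, B precomputes a boolean mask of which lines carry the TITLE prefix, locates the contiguous block's boundaries with two index lookups on that mask, and slices the line list once before mapping and joining.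
import Mathlib
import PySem

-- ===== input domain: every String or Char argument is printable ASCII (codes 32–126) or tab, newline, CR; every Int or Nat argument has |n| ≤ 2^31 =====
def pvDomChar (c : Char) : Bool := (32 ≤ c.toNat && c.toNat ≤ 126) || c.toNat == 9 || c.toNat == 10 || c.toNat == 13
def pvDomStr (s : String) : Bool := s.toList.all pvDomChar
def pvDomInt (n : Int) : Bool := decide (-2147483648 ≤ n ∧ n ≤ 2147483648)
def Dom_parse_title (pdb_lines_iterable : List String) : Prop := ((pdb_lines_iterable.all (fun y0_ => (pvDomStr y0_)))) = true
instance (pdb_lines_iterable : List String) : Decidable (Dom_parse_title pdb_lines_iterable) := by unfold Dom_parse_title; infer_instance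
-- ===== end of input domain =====

-- B replaces A's flag-driven loop with break by: a boolean mask of TITLE-prefix flags,
-- two index lookups on the mask to find the block's boundaries, one slice, then map+join (alternative; same cost).

-- B replaces A's flag-driven loop-with-break by: a boolean mask of TITLE-prefix flags,
-- two index lookups on the mask to find the block's boundaries, one slice, then map+join (alternative; same cost).

-- ===== PORT A =====
-- the for-loop with 'title' accumulator and early break
def parseTitleLoopA (lines : List String) (title : List String) : List String :=
  match lines with
  | [] => title
  | line :: rest =>
    if PySem.Str.startswith line "TITLE" then
      parseTitleLoopA rest (title ++ [PySem.Str.rstrip (PySem.Str.slice line (some 10) none)])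
    else if title ≠ [] then title
    else parseTitleLoopA rest title

def parse_title (pdb_lines_iterable : List String) : String :=
  PySem.Str.join "" (parseTitleLoopA pdb_lines_iterable [])

-- ===== PORT B =====
def parse_title_alt (pdb_lines_iterable : List String) : String :=
  let lines := pdb_lines_iterable
  let flags := lines.map (fun line => PySem.Str.startswith line "TITLE")
  if !flags.contains true then ""          -- "if True not in flags: return ''"
  else
    let start : Nat := (PySem.List.index? flags true).getD 0   -- flags.index(True); a hit is guaranteed by the guard
    let tail := PySem.List.slice flags (some (start : Int)) none       -- flags[start:]
    let length : Nat :=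
      if tail.contains false then (PySem.List.index? tail false).getD 0 else tail.length
    PySem.Str.join ""
      ((PySem.List.slice lines (some (start : Int)) (some ((start : Int) + (length : Int)))).map
        (fun line => PySem.Str.rstrip (PySem.Str.slice line (some 10) none)))

-- ===== PRECONDITION & SPEC =====
def Spec_parse_title (pdb_lines_iterable : List String) (out : String) : Prop := out = parse_title_alt pdb_lines_iterable
instance (pdb_lines_iterable : List String) (out : String) : Decidable (Spec_parse_title pdb_lines_iterable out) := by unfold Spec_parse_title; infer_instance

-- ===== CLAIM (what is proved, stated in full; the proofs are below) =====
def Claim_equal_parse_title : Prop := ∀ (pdb_lines_iterable : List String), Dom_parse_title pdb_lines_iterable → Spec_parse_title pdb_lines_iterable (parse_title pdb_lines_iterable)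

-- ===== LEMMAS AND PROOFS =====

-- once the accumulator is nonempty, A appends while lines start with TITLE and stops at the first that does not
theorem loopA_ne (lines : List String) (acc : List String) (h : acc ≠ []) :
    parseTitleLoopA lines acc =
      acc ++ (lines.takeWhile (fun l => PySem.Str.startswith l "TITLE")).map
        (fun line => PySem.Str.rstrip (PySem.Str.slice line (some 10) none)) := by
  induction lines generalizing acc with
  | nil => simp [parseTitleLoopA]
  | cons line rest ih =>
    by_cases hp : PySem.Chars.startswith line.toList ['T', 'I', 'T', 'L', 'E']
    · simp [parseTitleLoopA, hp, ih (acc ++ [_]) (by simp)]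
    · simp [parseTitleLoopA, hp, h]

-- A's loop is: skip to the first TITLE line, then harvest the contiguous TITLE block
theorem loopA_eq (lines : List String) :
    parseTitleLoopA lines [] =
      ((lines.dropWhile (fun l => !PySem.Str.startswith l "TITLE")).takeWhile
          (fun l => PySem.Str.startswith l "TITLE")).map
        (fun line => PySem.Str.rstrip (PySem.Str.slice line (some 10) none)) := by
  induction lines with
  | nil => simp [parseTitleLoopA]
  | cons line rest ih =>
    by_cases hp : PySem.Chars.startswith line.toList ['T', 'I', 'T', 'L', 'E']
    · simp [parseTitleLoopA, hp, loopA_ne rest [_] (by simp)]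
    · simp [parseTitleLoopA, hp, ih]


theorem drop_index_true_eq_dropWhile {α : Type} (p : α → Bool) (xs : List α) (k : Nat)
    (h : PySem.List.index? (xs.map p) true = some k) :
    xs.drop k = xs.dropWhile (fun x => !p x) := by
  rw [PySem.List.index?_eq_idxOf?] at h
  induction xs generalizing k with
  | nil => simp [List.idxOf?] at h
  | cons x rest ih =>
    by_cases hp : p x
    · have hk : k = 0 := by simp [List.idxOf?_cons, hp] at h; omega
      simp [hk, hp]
    · rw [List.map_cons, List.idxOf?_cons, (by simp [hp] : (p x == true) = false)] at h
      simp only [if_false, Bool.false_eq_true] at h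
      rcases Option.map_eq_some_iff.mp h with ⟨k', hk', rfl⟩
      simpa [hp] using ih k' hk'

theorem take_len_eq_takeWhile {α : Type} (p : α → Bool) (xs : List α) :
    xs.take (if (xs.map p).contains false then (PySem.List.index? (xs.map p) false).getD 0
             else (xs.map p).length) = xs.takeWhile p := by
  induction xs with
  | nil => simp
  | cons x rest ih =>
    by_cases hp : p x
    · rw [List.map_cons, hp]
      by_cases hc : (rest.map p).contains false
      · rw [if_pos (by simpa using hc), PySem.List.index?_eq_idxOf?, List.idxOf?_cons]
        simp only [(by simp : (true == false) = false), Bool.false_eq_true, if_neg,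
          not_false_iff]
        have hmem : false ∈ rest.map p := by simpa using hc
        obtain ⟨k', hk'⟩ := Option.isSome_iff_exists.mp (List.isSome_idxOf?.mpr hmem)
        rw [hk']
        simp only [Option.map_some, Option.getD_some, List.take_succ_cons,
          List.takeWhile_cons, hp]
        have := ih
        rw [if_pos hc, PySem.List.index?_eq_idxOf?, hk'] at this
        simpa using this
      · rw [if_neg (by simpa using hc)]
        have hall : rest.takeWhile p = rest := by
          rw [List.takeWhile_eq_self_iff]
          intro y hy
          by_contra hf
          exact hc (by simp; exact ⟨y, hy, by simpa using hf⟩)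
        simp [hp, hall]
    · rw [List.map_cons, (by simp [hp] : p x = false),
        if_pos (by simp), PySem.List.index?_eq_idxOf?, List.idxOf?_cons]
      simp [hp]

theorem alt_eq (lines : List String) :
    parse_title_alt lines =
    PySem.Str.join ""
      (((lines.dropWhile (fun l => !PySem.Str.startswith l "TITLE")).takeWhile
          (fun l => PySem.Str.startswith l "TITLE")).map
        (fun line => PySem.Str.rstrip (PySem.Str.slice line (some 10) none))) := by
  unfold parse_title_alt
  set p := fun l => PySem.Str.startswith l "TITLE" with hpdef
  by_cases hc : (lines.map p).contains true
  · simp only [hc, Bool.not_true, Bool.false_eq_true, if_false]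
    have hmem : true ∈ lines.map p := by simpa using hc
    obtain ⟨k, hk⟩ := Option.isSome_iff_exists.mp (List.isSome_idxOf?.mpr hmem)
    have hk' : PySem.List.index? (lines.map p) true = some k := by
      rw [PySem.List.index?_eq_idxOf?, hk]
    rw [hk']
    simp only [Option.getD_some, PySem.List.slice_from_natCast, ← List.map_drop]
    rw [drop_index_true_eq_dropWhile p lines k hk']
    rw [PySem.List.slice_natCast_add, drop_index_true_eq_dropWhile p lines k hk',
      take_len_eq_takeWhile p (lines.dropWhile fun x => !p x)]
  · have hcf : (lines.map p).contains true = false := by simpa using hc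
    have hnil : lines.dropWhile (fun l => !PySem.Str.startswith l "TITLE") = [] := by
      rw [List.dropWhile_eq_nil_iff]
      intro x hx
      simp only [Bool.not_eq_eq_eq_not, Bool.not_true]
      by_contra hf
      exact hc (by simp; exact ⟨x, hx, by simpa using hf⟩)
    rw [hnil]
    simp only [hcf, Bool.not_false, if_true, List.takeWhile_nil, List.map_nil]
    simp [PySem.Str.join]

-- ===== VERDICT (by name: the statement is the Claim_ definition above) =====
theorem parse_title_spec : Claim_equal_parse_title := by
  intro lines _
  unfold Spec_parse_title parse_title
  rw [loopA_eq, alt_eq]
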